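-- pv_equiv track=rewrite | github.com/pb-cdunn/falcon3 | falcon_kit/util/io.py | splitlines_iter
-- ===== SOURCE A (Python) =====
-- def splitlines_iter(text):
--     """This is the same as splitlines, but with a generator.
--     """
--     # https://stackoverflow.com/questions/3054604/iterate-over-the-lines-of-a-string
--     assert isinstance(text, str)
--     prevnl = -1
--     while True:
--         nextnl = text.find('\n', prevnl + 1) # u'\n' would force unicode
--         if nextnl < 0:
--             break
--         yield text[prevnl + 1:nextnl]
--         prevnl = nextnl
--     if (prevnl + 1) != len(text):
--         yield text[prevnl + 1:]
-- ===== SOURCE B (Python) =====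
-- def splitlines_iter(text):
--     """This is the same as splitlines, but with a generator."""
--     assert isinstance(text, str)
--     parts = text.split('\n')
--     if parts and parts[-1] == '':
--         parts = parts[:-1]
--     yield from parts
-- ===== Notes on version B (the rewrite author's own statement) =====
-- stated objective: simpler
-- what changed: Replaces A's incremental index-tracking find loop with one eager str.split on the newline character followed by dropping the single trailing empty piece that a final newline produces.
import Mathlib
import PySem

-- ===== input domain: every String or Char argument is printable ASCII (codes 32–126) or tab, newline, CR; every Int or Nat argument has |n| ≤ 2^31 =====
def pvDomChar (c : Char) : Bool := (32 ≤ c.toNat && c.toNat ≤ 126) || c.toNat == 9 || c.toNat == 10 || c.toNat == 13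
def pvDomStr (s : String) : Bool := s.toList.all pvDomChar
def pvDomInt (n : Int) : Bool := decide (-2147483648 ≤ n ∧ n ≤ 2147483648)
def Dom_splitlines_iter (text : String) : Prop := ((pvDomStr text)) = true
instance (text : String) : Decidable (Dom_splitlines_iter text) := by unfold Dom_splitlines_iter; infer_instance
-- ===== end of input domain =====

-- B replaces A's incremental index-tracking find('\n') loop with one eager split('\n')
-- followed by dropping the single trailing empty piece a final newline produces (objective: simpler).
-- Both versions are Python generators; only the sequence of yielded values is compared.

-- ===== PORT A =====
-- Python's `while True` find loop; the fuel bound text.length + 1 is never exhausted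
-- on the call below (each iteration advances prevnl past a distinct newline), as proved in pvALoop_eq.
def splitlinesALoop (text : String) (fuel : Nat) (prevnl : Int) : List String :=
  match fuel with
  | 0 => []
  | fuel + 1 =>
    let nextnl := PySem.Str.findFrom text "\n" (prevnl + 1) none
    if nextnl < 0 then
      if prevnl + 1 ≠ PySem.Str.len text then
        [PySem.Str.slice text (some (prevnl + 1)) none]
      else []
    else
      PySem.Str.slice text (some (prevnl + 1)) (some nextnl) ::
        splitlinesALoop text fuel nextnl

def splitlines_iter (text : String) : List String :=
  splitlinesALoop text (text.toList.length + 1) (-1)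

-- ===== PORT B =====
def splitlines_iter_alt (text : String) : List String :=
  let parts := (PySem.Str.split? text "\n").getD []
  if parts ≠ [] ∧ PySem.List.pyGet? parts (-1) = some "" then
    parts.dropLast
  else parts

-- ===== PRECONDITION & SPEC =====
def Spec_splitlines_iter (text : String) (out : List String) : Prop := out = splitlines_iter_alt text
instance (text : String) (out : List String) : Decidable (Spec_splitlines_iter text out) := by unfold Spec_splitlines_iter; infer_instance

-- ===== CLAIM (what is proved, stated in full; the proofs are below) =====
def Claim_equal_splitlines_iter : Prop := ∀ (text : String), Dom_splitlines_iter text → Spec_splitlines_iter text (splitlines_iter text)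

-- ===== LEMMAS AND PROOFS =====
-- pvSp is the reference "split on a newline" as a plain structural recursion;
-- both ports are reduced to (pvDropTrail (pvSp text.toList)).map String.ofList.

def pvMapHead (f : List Char → List Char) : List (List Char) → List (List Char)
  | [] => []
  | p :: ps => f p :: ps

def pvSp : List Char → List (List Char)
  | [] => [[]]
  | c :: rest => if c = '\n' then [] :: pvSp rest else pvMapHead (c :: ·) (pvSp rest)

def pvDropTrail (ps : List (List Char)) : List (List Char) :=
  if ps ≠ [] ∧ ps.getLast? = some [] then ps.dropLast else ps

theorem pvSp_ne_nil (l : List Char) : pvSp l ≠ [] := by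
  cases l with
  | nil => simp [pvSp]
  | cons c rest =>
    simp only [pvSp]; split
    · simp
    · cases h : pvSp rest with
      | nil => exact absurd h (pvSp_ne_nil rest)
      | cons p ps => simp [pvMapHead]

theorem pvSp_no_nl (l : List Char) (h : '\n' ∉ l) : pvSp l = [l] := by
  induction l with
  | nil => simp [pvSp]
  | cons c rest ih =>
    simp only [List.mem_cons, not_or] at h
    simp [pvSp, Ne.symm h.1, ih h.2, pvMapHead]

theorem pvSp_decomp (a r : List Char) (h : '\n' ∉ a) :
    pvSp (a ++ '\n' :: r) = a :: pvSp r := by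
  induction a with
  | nil => simp [pvSp]
  | cons c a ih =>
    simp only [List.mem_cons, not_or] at h
    simp [pvSp, Ne.symm h.1, ih h.2, pvMapHead]

theorem pvGo_eq (l : List Char) : ∀ (fuel : Nat) (cur : List Char) (acc : List (List Char)),
    l.length < fuel →
    PySem.Chars.splitOn.go ['\n'] fuel l cur acc
      = acc.reverse ++ pvMapHead (cur.reverse ++ ·) (pvSp l) := by
  induction l with
  | nil =>
    intro fuel cur acc h
    match fuel, h with
    | fuel+1, _ => simp [PySem.Chars.splitOn.go, pvSp, pvMapHead]
  | cons c rest ih =>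
    intro fuel cur acc h
    match fuel, h with
    | fuel+1, h =>
      simp only [PySem.Chars.splitOn.go]
      by_cases hc : c = '\n'
      · subst hc
        have hpre : ['\n'].isPrefixOf ('\n' :: rest) = true := by simp [List.isPrefixOf]
        rw [if_pos hpre]
        simp only [List.length_cons, List.length_nil, List.drop_succ_cons, List.drop_zero]
        rw [ih fuel [] (cur.reverse :: acc) (by simpa using Nat.lt_of_succ_lt_succ h)]
        cases hsp : pvSp rest with
        | nil => exact absurd hsp (pvSp_ne_nil rest)
        | cons p ps => simp [pvSp, pvMapHead, hsp]
      · have hpre : ['\n'].isPrefixOf (c :: rest) = false := by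
          simp [List.isPrefixOf, Ne.symm hc]
        rw [if_neg (by simp [hpre])]
        rw [ih fuel (c :: cur) acc (by simpa using Nat.lt_of_succ_lt_succ h)]
        cases hsp : pvSp rest with
        | nil => exact absurd hsp (pvSp_ne_nil rest)
        | cons p ps => simp [pvSp, hc, pvMapHead, hsp]

theorem pvSplitOn_eq (cs : List Char) : PySem.Chars.splitOn cs ['\n'] = pvSp cs := by
  rw [PySem.Chars.splitOn, pvGo_eq cs (cs.length + 1) [] [] (by omega)]
  cases hsp : pvSp cs with
  | nil => exact absurd hsp (pvSp_ne_nil cs)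
  | cons p ps => simp [pvMapHead]

theorem pvDropTrail_cons (a : List Char) (ps : List (List Char)) (h : ps ≠ []) :
    pvDropTrail (a :: ps) = a :: pvDropTrail ps := by
  cases ps with
  | nil => exact absurd rfl h
  | cons p qs => simp only [pvDropTrail, ne_eq, reduceCtorEq, not_false_eq_true, true_and,
      List.getLast?_cons_cons, List.dropLast_cons_of_ne_nil]; split <;> simp

theorem pvStrEq {s t : String} (h : s.toList = t.toList) : s = t := by
  rw [← String.ofList_toList (s := s), h, String.ofList_toList]

theorem pvAlt_eq (text : String) :
    splitlines_iter_alt text = (pvDropTrail (pvSp text.toList)).map String.ofList := by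
  unfold splitlines_iter_alt pvDropTrail
  rw [PySem.Str.split?]
  have : PySem.Chars.split? text.toList "\n".toList = some (pvSp text.toList) := by
    simp [PySem.Chars.split?, pvSplitOn_eq]
  rw [this]
  cases hsp : pvSp text.toList with
  | nil => exact absurd hsp (pvSp_ne_nil _)
  | cons p ps =>
    simp only [Option.map_some, Option.getD_some]
    have hne : (p :: ps).map String.ofList ≠ [] := by simp
    have hlen : ((p :: ps).map String.ofList).length = ps.length + 1 := by simp
    have hget : PySem.List.pyGet? ((p :: ps).map String.ofList) (-1)
        = ((p :: ps).map String.ofList).getLast? := by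
      simp [PySem.List.pyGet?, PySem.List.pyIdx?, List.getLast?_eq_getElem?]
    rw [hget]
    have hlast : ((p :: ps).map String.ofList).getLast? = ((p :: ps).getLast?).map String.ofList :=
      List.getLast?_map
    by_cases hcase : (p :: ps).getLast? = some []
    · rw [if_pos ⟨hne, by rw [hlast, hcase]; rfl⟩, if_pos ⟨by simp, hcase⟩]
      exact List.map_dropLast.symm
    · rw [if_neg, if_neg (by simp [hcase])]
      rintro ⟨-, habs⟩
      rw [hlast] at habs
      obtain ⟨q, hq1, hq2⟩ := Option.map_eq_some_iff.mp habs
      apply hcase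
      rw [hq1]
      have : q = [] := by
        have := congrArg String.toList hq2
        simpa using this
      rw [this]

theorem pvALoop_eq (text : String) : ∀ (fuel : Nat) (k : Nat),
    k ≤ text.toList.length → text.toList.length - k < fuel →
    splitlinesALoop text fuel ((k : Int) - 1)
      = (pvDropTrail (pvSp (text.toList.drop k))).map String.ofList := by
  intro fuel
  induction fuel with
  | zero => intro k hk h; omega
  | succ fuel ih =>
    intro k hk h
    simp only [splitlinesALoop]
    have hk1 : (k : Int) - 1 + 1 = (k : Int) := by ring
    rw [hk1, PySem.Str.findFrom_eq]
    have hnl : ("\n" : String).toList = ['\n'] := rfl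
    rw [hnl, PySem.Chars.findFrom_natCast text.toList ['\n'] k hk]
    by_cases hf : PySem.Chars.find (text.toList.drop k) ['\n'] = -1
    · rw [if_pos hf, if_pos (by norm_num)]
      have hmem : '\n' ∉ text.toList.drop k := by
        intro hm
        obtain ⟨s, t, hst⟩ := List.append_of_mem hm
        exact (PySem.Chars.find_eq_neg_one_iff _ _).mp hf ⟨s, t, by rw [hst]; simp⟩
      rw [pvSp_no_nl _ hmem]
      rw [PySem.Str.len_eq]
      by_cases hkl : k = text.toList.length
      · rw [if_neg (by rw [hkl]; norm_num)]
        simp [pvDropTrail, List.drop_of_length_le (le_of_eq hkl.symm)]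
      · rw [if_pos (by omega)]
        have hdne : text.toList.drop k ≠ [] := by
          simp only [ne_eq, List.drop_eq_nil_iff]; omega
        rw [pvDropTrail, if_neg (by simp [hdne])]
        simp only [List.map_cons, List.map_nil]
        congr 1
        apply pvStrEq
        rw [PySem.Str.toList_slice]
        simp [PySem.List.slice_from _ (by positivity : (0:Int) ≤ (k:Int))]
    · rw [if_neg hf]
      set cs := text.toList with hcs
      have hf0 : 0 ≤ PySem.Chars.find (cs.drop k) ['\n'] := by
        have := PySem.Chars.neg_one_le_find (cs.drop k) ['\n']
        omega
      obtain ⟨hpre, hmin⟩ := PySem.Chars.find_spec hf0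
      set n := (PySem.Chars.find (cs.drop k) ['\n']).toNat with hn
      have hfn : PySem.Chars.find (cs.drop k) ['\n'] = (n : Int) := by omega
      have hnlt : n < (cs.drop k).length := by
        by_contra habs
        rw [List.drop_of_length_le (by omega)] at hpre
        simpa using hpre.length_le
      have hlen : (cs.drop k).length = cs.length - k := by simp
      obtain ⟨t, ht⟩ := hpre
      have hdropn : (cs.drop k).drop n = '\n' :: t := by simpa using ht.symm
      have hdecomp : cs.drop k = (cs.drop k).take n ++ '\n' :: t := by
        rw [← hdropn, List.take_append_drop]
      have ht' : (cs.drop k).drop (n + 1) = t := by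
        rw [← List.drop_drop, hdropn]; rfl
      have hA : '\n' ∉ (cs.drop k).take n := by
        intro hm
        obtain ⟨i, hi, hEl⟩ := List.mem_iff_getElem.mp hm
        have hi' : i < n := by simp at hi; omega
        refine hmin i hi' ?_
        have hig : (cs.drop k)[i]'(by omega) = '\n' := by
          simpa using hEl
        refine ⟨(cs.drop k).drop (i+1), ?_⟩
        rw [← hig]
        exact (List.drop_eq_getElem_cons (by omega)).symm
      have hsp : pvSp (cs.drop k) = (cs.drop k).take n :: pvSp t := by
        conv_lhs => rw [hdecomp]
        exact pvSp_decomp _ _ hA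
      have hlt : ¬ ((k : Int) + (n : Int) < 0) := by omega
      rw [hfn, if_neg (by omega)]
      have hrec : splitlinesALoop text fuel ((k : Int) + (n : Int))
          = (pvDropTrail (pvSp (cs.drop (k + n + 1)))).map String.ofList := by
        have : (k : Int) + (n : Int) = ((k + n + 1 : Nat) : Int) - 1 := by push_cast; ring
        rw [this]
        exact ih (k + n + 1) (by omega) (by omega)
      rw [hrec]
      have hdd : cs.drop (k + n + 1) = t := by
        rw [← ht', List.drop_drop]; ring_nf
      rw [hdd, hsp, pvDropTrail_cons _ _ (pvSp_ne_nil t), List.map_cons]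
      congr 1
      apply pvStrEq
      rw [PySem.Str.toList_slice]
      have : (k : Int) + (n : Int) = ((k + n : Nat) : Int) := by push_cast; ring
      rw [this]
      simp only [PySem.Chars.slice_eq_listSlice, PySem.List.slice_natCast]
      rw [String.toList_ofList]
      congr 1
      omega

-- ===== VERDICT (by name: the statement is the Claim_ definition above) =====
theorem splitlines_iter_spec : Claim_equal_splitlines_iter := by
  intro text _
  unfold Spec_splitlines_iter splitlines_iter
  rw [pvAlt_eq]
  have h := pvALoop_eq text (text.toList.length + 1) 0 (Nat.zero_le _) (by omega)
  simpa using h
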